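-- pv_equiv track=rewrite | github.com/cellularmitosis/leopard.sh | utils/config_cache_collate.py | split_slug
-- ===== SOURCE A (Python) =====
-- def split_slug(slug):
--     """
--     behavior:
--     a => [a]
--     _a => [_a]
--     a_b => [a, b]
--     a__b => [a, _b]
--     _a___b => [_a, __b]
--     foo___bar_t => [foo, __bar, t]
--     """
--     def consume_word(slug, is_first_word):
--         word = ""
--
--         # capture any leading underscores:
--         did_skip_first_underscore = is_first_word
--         while True:
--             if len(slug) == 0:
--                 return (word, slug)
--             ch = slug[0]
--             if ch == '_':
--                 if not did_skip_first_underscore: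
--                     did_skip_first_underscore = True
--                 else:
--                     word += ch
--                 slug = slug[1:]
--                 continue
--             else:
--                 break
--
--         # capture the non-underscore chars:
--         while True:
--             if len(slug) == 0:
--                 return (word, slug)
--             ch = slug[0]
--             if ch != '_':
--                 word += ch
--                 slug = slug[1:]
--                 continue
--             else:
--                 break
--
--         return (word, slug)
--
--     words = []
--     is_first = True
--     while len(slug) > 0:
--         (word, slug) = consume_word(slug, is_first)
--         if len(word) > 0:
--             words.append(word)
--         is_first = False
--     return words
-- ===== SOURCE B (Python) =====
-- def split_slug(slug):
--     """
--     behavior: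
--     a => [a]
--     _a => [_a]
--     a_b => [a, b]
--     a__b => [a, _b]
--     _a___b => [_a, __b]
--     foo___bar_t => [foo, __bar, t]
--     """
--     parts = slug.split('_')
--     # index of the first non-empty part (or last index if all empty)
--     k = 0
--     while k < len(parts) - 1 and parts[k] == '':
--         k += 1
--     words = []
--     first = '_' * k + parts[k]
--     if first:
--         words.append(first)
--     pending = 0
--     for p in parts[k + 1:]:
--         if p == '':
--             pending += 1
--         else:
--             words.append('_' * pending + p)
--             pending = 0
--     if pending > 1:
--         words.append('_' * (pending - 1))
--     return words
-- ===== Notes on version B (the rewrite author's own statement) =====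
-- stated objective: faster
-- what changed: B replaces A's char-by-char state machine (nested while loops with a skip flag and repeated slicing) by one str.split on the underscore separator followed by a linear reassembly pass that counts pending empty parts as extra underscores.
import Mathlib
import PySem

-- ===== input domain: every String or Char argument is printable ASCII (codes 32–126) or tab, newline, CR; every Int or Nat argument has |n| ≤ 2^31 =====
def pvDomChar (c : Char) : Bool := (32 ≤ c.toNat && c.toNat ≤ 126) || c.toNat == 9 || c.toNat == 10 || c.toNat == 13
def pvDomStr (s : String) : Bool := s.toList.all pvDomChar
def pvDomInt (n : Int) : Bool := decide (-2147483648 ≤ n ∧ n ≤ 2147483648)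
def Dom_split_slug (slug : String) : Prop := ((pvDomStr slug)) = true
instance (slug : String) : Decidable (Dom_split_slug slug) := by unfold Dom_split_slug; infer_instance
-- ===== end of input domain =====

-- B replaces A's char-by-char state machine by split('_') plus one reassembly pass; return values agree on all inputs.

-- ===== PORT A =====
-- second while loop of consume_word: capture the non-underscore chars
def cwCapture (word : List Char) : List Char → (List Char × List Char)
  | [] => (word, [])
  | c :: rest => if c ≠ '_' then cwCapture (word ++ [c]) rest else (word, c :: rest)

-- first while loop of consume_word: capture leading underscores (skipping one unless first word)
def cwSkip (skipped : Bool) (word : List Char) : List Char → (List Char × List Char)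
  | [] => (word, [])
  | c :: rest =>
    if c = '_' then
      if skipped then cwSkip skipped (word ++ ['_']) rest else cwSkip true word rest
    else cwCapture word (c :: rest)

theorem cwCapture_snd_le (w : List Char) (s : List Char) : (cwCapture w s).2.length ≤ s.length := by
  induction s generalizing w with
  | nil => simp [cwCapture]
  | cons c rest ih =>
    simp only [cwCapture]
    split
    · exact Nat.le_trans (ih _) (Nat.le_succ _)
    · simp

theorem cwSkip_snd_le (f : Bool) (w : List Char) (s : List Char) : (cwSkip f w s).2.length ≤ s.length := by
  induction s generalizing f w with
  | nil => simp [cwSkip]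
  | cons c rest ih =>
    simp only [cwSkip]
    split
    · split
      · exact Nat.le_trans (ih _ _) (Nat.le_succ _)
      · exact Nat.le_trans (ih _ _) (Nat.le_succ _)
    · simpa using cwCapture_snd_le w (c :: rest)

theorem cwSkip_snd_lt (f : Bool) (c : Char) (rest : List Char) :
    (cwSkip f [] (c :: rest)).2.length < (c :: rest).length := by
  simp only [cwSkip]
  split
  · split
    · exact Nat.lt_succ_of_le (cwSkip_snd_le _ _ _)
    · exact Nat.lt_succ_of_le (cwSkip_snd_le _ _ _)
  · simp only [cwCapture]
    split
    · exact Nat.lt_succ_of_le (cwCapture_snd_le _ _)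
    · simp_all

-- the outer while loop of split_slug
def loopA (slug : List Char) (isFirst : Bool) (words : List (List Char)) : List (List Char) :=
  if h : slug = [] then words
  else
    loopA (cwSkip isFirst [] slug).2 false
      (if (cwSkip isFirst [] slug).1 ≠ [] then words ++ [(cwSkip isFirst [] slug).1] else words)
termination_by slug.length
decreasing_by
  cases slug with
  | nil => exact absurd rfl h
  | cons c rest => exact cwSkip_snd_lt _ c rest

def split_slug (slug : String) : List String :=
  (loopA slug.toList true []).map String.mk

-- ===== PORT B =====
-- while k < len(parts) - 1 and parts[k] == '': k += 1
def findK : List (List Char) → Nat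
  | [] => 0
  | [_] => 0
  | p :: q :: rest => if p = [] then findK (q :: rest) + 1 else 0

-- for p in parts[k+1:]: … maintaining (words, pending)
def bLoop : (List (List Char) × Nat) → List (List Char) → (List (List Char) × Nat)
  | st, [] => st
  | (ws, p), q :: rest =>
    if q = [] then bLoop (ws, p + 1) rest
    else bLoop (ws ++ [List.replicate p '_' ++ q], 0) rest

def split_slug_alt (slug : String) : List String :=
  let parts := PySem.Chars.splitOn slug.toList ['_']
  let k := findK parts
  let first := List.replicate k '_' ++ parts.getD k []
  let words0 := if first ≠ [] then [first] else []
  let st := bLoop (words0, 0) (parts.drop (k + 1))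
  let ws := if st.2 > 1 then st.1 ++ [List.replicate (st.2 - 1) '_'] else st.1
  ws.map String.mk

-- ===== PRECONDITION & SPEC =====
def Spec_split_slug (slug : String) (out : List String) : Prop := out = split_slug_alt slug
instance (slug : String) (out : List String) : Decidable (Spec_split_slug slug out) := by unfold Spec_split_slug; infer_instance

-- ===== CLAIM (what is proved, stated in full; the proofs are below) =====
def Claim_equal_split_slug : Prop := ∀ (slug : String), Dom_split_slug slug → Spec_split_slug slug (split_slug slug)

-- ===== LEMMAS AND PROOFS =====

-- proof-only helpers
def consH (w : List Char) : List (List Char) → List (List Char)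
  | [] => [w]
  | h :: t => (w ++ h) :: t

def splitU : List Char → List (List Char)
  | [] => [[]]
  | c :: s => if c = '_' then [] :: splitU s else consH [c] (splitU s)

def tw : Nat → List (List Char) → List (List Char)
  | p, [] => if p > 1 then [List.replicate (p - 1) '_'] else []
  | p, q :: rest => if q = [] then tw (p + 1) rest else (List.replicate p '_' ++ q) :: tw 0 rest

theorem splitU_ne_nil (s : List Char) : splitU s ≠ [] := by
  cases s with
  | nil => simp [splitU]
  | cons c t =>
    simp only [splitU]
    split
    · simp
    · cases h : splitU t <;> simp [consH]

theorem consH_consH (a b : List Char) (P : List (List Char)) :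
    consH a (consH b P) = consH (a ++ b) P := by
  cases P <;> simp [consH]

theorem consH_nil (P : List (List Char)) (h : P ≠ []) : consH [] P = P := by
  cases P with
  | nil => exact absurd rfl h
  | cons x t => simp [consH]

theorem cwCapture_spec (s : List Char) (w : List Char) :
    cwCapture w s = (w ++ s.takeWhile (fun c => !(c == '_')), s.dropWhile (fun c => !(c == '_'))) := by
  induction s generalizing w with
  | nil => simp [cwCapture]
  | cons c rest ih =>
    simp only [cwCapture, List.takeWhile, List.dropWhile]
    by_cases hc : c = '_'
    · simp [hc]
    · have hb : (c == '_') = false := by simp [hc]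
      simp [hc, ih, hb]

theorem cwSkipT_spec (s : List Char) (w : List Char) :
    cwSkip true w s =
      (w ++ s.takeWhile (fun c => c == '_') ++
        ((s.dropWhile (fun c => c == '_')).takeWhile (fun c => !(c == '_'))),
       (s.dropWhile (fun c => c == '_')).dropWhile (fun c => !(c == '_'))) := by
  induction s generalizing w with
  | nil => simp [cwSkip]
  | cons c rest ih =>
    simp only [cwSkip, List.takeWhile, List.dropWhile]
    by_cases hc : c = '_'
    · simp [hc, ih]
    · have hb : (c == '_') = false := by simp [hc]
      simp [hc, hb, cwCapture_spec, List.takeWhile, List.dropWhile]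

theorem cwSkipF_underscore (s : List Char) : cwSkip false [] ('_' :: s) = cwSkip true [] s := by
  simp [cwSkip]

theorem loopA_nil (f : Bool) (acc : List (List Char)) : loopA [] f acc = acc := by
  rw [loopA]; simp

theorem loopA_ne (s : List Char) (h : s ≠ []) (f : Bool) (acc : List (List Char)) :
    loopA s f acc = loopA (cwSkip f [] s).2 false
      (if (cwSkip f [] s).1 ≠ [] then acc ++ [(cwSkip f [] s).1] else acc) := by
  rw [loopA]; simp [h]

theorem loopA_acc (n : Nat) (s : List Char) (hn : s.length ≤ n) (f : Bool) (acc : List (List Char)) :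
    loopA s f acc = acc ++ loopA s f [] := by
  induction n generalizing s f acc with
  | zero =>
    have : s = [] := by cases s <;> simp_all
    subst this; simp [loopA_nil]
  | succ n ih =>
    cases hs : s with
    | nil => simp [loopA_nil]
    | cons c rest =>
      subst hs
      rw [loopA_ne (c :: rest) (by simp) f acc, loopA_ne (c :: rest) (by simp) f []]
      have hlt := cwSkip_snd_lt f c rest
      have hle : (cwSkip f [] (c :: rest)).2.length ≤ n := by
        simp only [List.length_cons] at hlt hn; omega
      simp only [List.nil_append]
      split
      · rw [ih _ hle false (acc ++ [(cwSkip f [] (c :: rest)).1]),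
            ih _ hle false [(cwSkip f [] (c :: rest)).1]]
        simp
      · exact ih _ hle false acc

theorem bLoop_tw (P : List (List Char)) (ws : List (List Char)) (p : Nat) :
    (if (bLoop (ws, p) P).2 > 1 then
        (bLoop (ws, p) P).1 ++ [List.replicate ((bLoop (ws, p) P).2 - 1) '_']
      else (bLoop (ws, p) P).1) = ws ++ tw p P := by
  induction P generalizing ws p with
  | nil => simp only [bLoop, tw]; split <;> simp
  | cons q rest ih =>
    simp only [bLoop, tw]
    by_cases hq : q = []
    · simp [hq, ih]
    · simp [hq, ih]

theorem splitU_rep (u : Nat) (t : List Char) :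
    splitU (List.replicate u '_' ++ t) = List.replicate u [] ++ splitU t := by
  induction u with
  | zero => simp
  | succ m ih => simp [List.replicate_succ, splitU, ih]

theorem splitU_free (w t : List Char) (hw : ∀ c ∈ w, ¬ c = '_') :
    splitU (w ++ t) = consH w (splitU t) := by
  induction w with
  | nil => exact (consH_nil _ (splitU_ne_nil t)).symm
  | cons c w' ih =>
    have hc : ¬ c = '_' := hw c (by simp)
    simp only [List.cons_append, splitU, hc, if_false]
    rw [ih (fun d hd => hw d (by simp [hd])), consH_consH]
    simp

theorem tw_repNil (u : Nat) (p : Nat) (P : List (List Char)) :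
    tw p (List.replicate u [] ++ P) = tw (p + u) P := by
  induction u generalizing p with
  | zero => simp
  | succ m ih =>
    have h1 : List.replicate (m + 1) ([] : List Char) ++ P = [] :: (List.replicate m [] ++ P) := by
      simp [List.replicate_succ]
    rw [h1, show ∀ X, tw p ([] :: X) = tw (p + 1) X from fun X => by simp [tw], ih,
       show p + 1 + m = p + (m + 1) from by omega]

theorem findK_rep (u : Nat) (L : List Char) (T : List (List Char)) (hL : L ≠ []) :
    findK (List.replicate u [] ++ L :: T) = u := by
  induction u with
  | zero => cases T <;> simp [findK, hL]
  | succ m ih =>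
    have : List.replicate (m + 1) ([] : List Char) ++ L :: T
        = [] :: (List.replicate m [] ++ L :: T) := by simp [List.replicate_succ]
    rw [this]
    cases hm : List.replicate m ([] : List Char) ++ L :: T with
    | nil => simp at hm
    | cons a b => simp [findK, ← hm, ih]

theorem findK_all_nil (m : Nat) : findK (List.replicate (m + 1) ([] : List Char)) = m := by
  induction m with
  | zero => simp [findK]
  | succ k ih =>
    have : List.replicate (k + 2) ([] : List Char) = [] :: List.replicate (k + 1) [] := by
      simp [List.replicate_succ]
    rw [this]
    cases hm : List.replicate (k + 1) ([] : List Char) with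
    | nil => simp at hm
    | cons a b => simp [findK, ← hm, ih]

theorem getD_rep (u : Nat) (x : List Char) (P : List (List Char)) :
    (List.replicate u ([] : List Char) ++ x :: P).getD u [] = x := by
  induction u with
  | zero => simp
  | succ m ih => simp [List.replicate_succ, ih]

theorem drop_rep (u : Nat) (x : List Char) (P : List (List Char)) :
    (List.replicate u ([] : List Char) ++ x :: P).drop (u + 1) = P := by
  induction u with
  | zero => simp
  | succ m ih => simp [List.replicate_succ, ih]

theorem dropWhile_head_false {p : Char → Bool} (l : List Char) (c : Char) (t : List Char)
    (h : l.dropWhile p = c :: t) : p c = false := by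
  induction l with
  | nil => simp at h
  | cons a l' ih =>
    simp only [List.dropWhile] at h
    by_cases ha : p a
    · exact ih (by simpa [ha] using h)
    · simp [ha] at h
      simp [← h.1]; simpa using ha

theorem takeWhile_rep (s : List Char) :
    s.takeWhile (fun c => c == '_') =
      List.replicate (s.takeWhile (fun c => c == '_')).length '_' := by
  rw [List.eq_replicate_iff]
  refine ⟨rfl, fun b hb => ?_⟩
  have := List.mem_takeWhile_imp hb
  simpa using this

theorem go_spec (fuel : Nat) (s cur : List Char) (acc : List (List Char)) (h : s.length < fuel) :
    PySem.Chars.splitOn.go ['_'] fuel s cur acc = acc.reverse ++ consH cur.reverse (splitU s) := by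
  induction fuel generalizing s cur acc with
  | zero => omega
  | succ m ih =>
    cases s with
    | nil =>
      rw [PySem.Chars.splitOn.go] <;> simp [splitU, consH]
    | cons c rest =>
      rw [PySem.Chars.splitOn.go]
      by_cases hc : c = '_'
      · have hpre : List.isPrefixOf ['_'] (c :: rest) = true := by
          simp [List.isPrefixOf, hc]
        simp only [hpre, if_true, List.length_cons, List.length_nil, List.length_singleton,
          List.drop_succ_cons, List.drop_zero]
        rw [ih rest [] (cur.reverse :: acc) (by simpa using Nat.lt_of_succ_lt_succ h)]
        simp [splitU, hc, consH_nil _ (splitU_ne_nil rest), consH]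
        cases hsp : splitU rest with
        | nil => exact absurd hsp (splitU_ne_nil rest)
        | cons a b => simp [consH]
      · have hpre : List.isPrefixOf ['_'] (c :: rest) = false := by
          simp [List.isPrefixOf]
          intro hh; exact absurd hh.symm hc
        simp only [hpre, Bool.false_eq_true, if_false]
        rw [ih rest (c :: cur) acc (by simpa using Nat.lt_of_succ_lt_succ h)]
        have : splitU (c :: rest) = consH [c] (splitU rest) := by simp [splitU, hc]
        rw [this, consH_consH, List.reverse_cons]

theorem splitOn_eq_splitU (s : List Char) : PySem.Chars.splitOn s ['_'] = splitU s := by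
  rw [PySem.Chars.splitOn]
  rw [go_spec (s.length + 1) s [] [] (by omega)]
  simp [consH_nil _ (splitU_ne_nil s)]

-- the result of B's pipeline on a parts list
def pipeB (parts : List (List Char)) : List (List Char) :=
  let k := findK parts
  let first := List.replicate k '_' ++ parts.getD k []
  let words0 := if first ≠ [] then [first] else []
  let st := bLoop (words0, 0) (parts.drop (k + 1))
  if st.2 > 1 then st.1 ++ [List.replicate (st.2 - 1) '_'] else st.1

theorem L_head_ne (s : List Char) (hd : s.dropWhile (fun c => c == '_') ≠ []) :
    (s.dropWhile (fun c => c == '_')).takeWhile (fun c => !(c == '_')) ≠ [] := by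
  cases hdd : s.dropWhile (fun c => c == '_') with
  | nil => exact absurd hdd hd
  | cons c t =>
    have hf := dropWhile_head_false (p := fun c => c == '_') s c t hdd
    simp [List.takeWhile, hf]

theorem skip_decomp (s : List Char) :
    cwSkip true [] s =
      (List.replicate (s.takeWhile (fun c => c == '_')).length '_' ++
        ((s.dropWhile (fun c => c == '_')).takeWhile (fun c => !(c == '_'))),
       (s.dropWhile (fun c => c == '_')).dropWhile (fun c => !(c == '_'))) := by
  rw [cwSkipT_spec, ← takeWhile_rep]
  simp

theorem s_decomp (s : List Char) :
    s = List.replicate (s.takeWhile (fun c => c == '_')).length '_' ++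
        ((s.dropWhile (fun c => c == '_')).takeWhile (fun c => !(c == '_')) ++
         (s.dropWhile (fun c => c == '_')).dropWhile (fun c => !(c == '_'))) := by
  conv_lhs => rw [← List.takeWhile_append_dropWhile (p := fun c => c == '_') (l := s)]
  rw [← takeWhile_rep,
    List.takeWhile_append_dropWhile (p := fun c => !(c == '_'))
      (l := s.dropWhile (fun c => c == '_'))]

theorem L_free (s : List Char) :
    ∀ c ∈ (s.dropWhile (fun c => c == '_')).takeWhile (fun c => !(c == '_')), ¬ c = '_' := by
  intro c hc
  have := List.mem_takeWhile_imp hc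
  simpa using this

theorem tw_cons_ne (p : Nat) (q : List Char) (hq : q ≠ []) (P : List (List Char)) :
    tw p (q :: P) = (List.replicate p '_' ++ q) :: tw 0 P := by
  cases q with
  | nil => exact absurd rfl hq
  | cons a b => simp [tw]

theorem mainR (n : Nat) : ∀ (s : List Char), s.length ≤ n →
    loopA ('_' :: s) false [] = tw 0 (splitU s) := by
  induction n with
  | zero =>
    intro s hn
    have hs : s = [] := by cases s <;> simp_all
    subst hs
    rw [loopA_ne _ (by simp)]
    simp [cwSkip, splitU, tw, loopA_nil]
  | succ m ih =>
    intro s hn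
    rw [loopA_ne _ (by simp), cwSkipF_underscore, skip_decomp]
    have hsplit : splitU s =
        List.replicate (s.takeWhile (fun c => c == '_')).length [] ++
          consH ((s.dropWhile (fun c => c == '_')).takeWhile (fun c => !(c == '_')))
            (splitU ((s.dropWhile (fun c => c == '_')).dropWhile (fun c => !(c == '_')))) := by
      conv_lhs => rw [s_decomp s]
      rw [splitU_rep, splitU_free _ _ (L_free s)]
    rw [hsplit]
    set u := (s.takeWhile (fun c => c == '_')).length with hu
    set L := (s.dropWhile (fun c => c == '_')).takeWhile (fun c => !(c == '_')) with hL
    set r := (s.dropWhile (fun c => c == '_')).dropWhile (fun c => !(c == '_')) with hr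
    cases hrc : r with
    | nil =>
      rw [loopA_nil]
      simp only [splitU, consH_nil _ (splitU_ne_nil [])]
      rw [show consH L [[]] = [L] from by simp [consH]]
      rw [tw_repNil]
      cases hLc : L with
      | nil =>
        cases hun : u with
        | zero => simp [tw]
        | succ k => simp [tw, List.replicate_succ]
      | cons a b =>
        rw [tw_cons_ne (0 + u) (a :: b) (by simp) []]
        simp [hLc, tw]
    | cons c r' =>
      have hcu : c = '_' := by
        have hf := dropWhile_head_false (p := fun c => !(c == '_'))
          (s.dropWhile (fun c => c == '_')) c r' (by rw [← hr, hrc])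
        simpa using hf
      subst hcu
      have hdne : s.dropWhile (fun c => c == '_') ≠ [] := by
        intro hd
        rw [hr, hd] at hrc
        simp at hrc
      have hLne : L ≠ [] := by rw [hL]; exact L_head_ne s hdne
      have hfne : List.replicate u '_' ++ L ≠ [] := by simp [hLne]
      simp only [hfne, ne_eq, not_false_eq_true, if_pos]
      have hlen : r'.length ≤ m := by
        have := congrArg List.length (s_decomp s)
        rw [← hu, ← hL, ← hr, hrc] at this
        have hL1 : 0 < L.length := List.length_pos_of_ne_nil hLne
        simp only [List.length_append, List.length_replicate, List.length_cons] at this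
        omega
      rw [loopA_acc (r'.length + 1) _ (by simp) false, ih r' hlen]
      rw [show splitU ('_' :: r') = [] :: splitU r' from by simp [splitU]]
      rw [show consH L ([] :: splitU r') = L :: splitU r' from by simp [consH]]
      rw [tw_repNil, tw_cons_ne (0 + u) L hLne (splitU r')]
      simp

theorem mainT (s : List Char) : loopA s true [] = pipeB (splitU s) := by
  cases hsc : s with
  | nil =>
    rw [loopA_nil]
    simp [pipeB, splitU, findK, bLoop]
  | cons c0 s0 =>
    rw [← hsc, loopA_ne s (by simp [hsc]) true [], skip_decomp]
    have hsplit : splitU s =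
        List.replicate (s.takeWhile (fun c => c == '_')).length [] ++
          consH ((s.dropWhile (fun c => c == '_')).takeWhile (fun c => !(c == '_')))
            (splitU ((s.dropWhile (fun c => c == '_')).dropWhile (fun c => !(c == '_')))) := by
      conv_lhs => rw [s_decomp s]
      rw [splitU_rep, splitU_free _ _ (L_free s)]
    rw [hsplit]
    set u := (s.takeWhile (fun c => c == '_')).length with hu
    set L := (s.dropWhile (fun c => c == '_')).takeWhile (fun c => !(c == '_')) with hL
    set r := (s.dropWhile (fun c => c == '_')).dropWhile (fun c => !(c == '_')) with hr
    cases hrc : r with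
    | nil =>
      rw [loopA_nil]
      rw [show splitU ([] : List Char) = [[]] from by simp [splitU]]
      rw [show consH L [[]] = [L] from by simp [consH]]
      simp only [pipeB]
      cases hLc : L with
      | nil =>
        rw [show List.replicate u ([] : List Char) ++ [[]] = List.replicate (u + 1) [] from by
          simp [List.replicate_succ']
        ]
        rw [findK_all_nil u]
        rw [show (List.replicate (u + 1) ([] : List Char)).getD u [] = [] from by
          rw [show List.replicate (u + 1) ([] : List Char) = List.replicate u [] ++ [[]] from by
            simp [List.replicate_succ']]
          exact getD_rep u [] []]
        rw [show (List.replicate (u + 1) ([] : List Char)).drop (u + 1) = [] from by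
          simp]
        simp only [bLoop]
        cases hun : u with
        | zero => simp [bLoop]
        | succ k => simp [bLoop, List.replicate_succ]
      | cons a b =>
        rw [findK_rep u (a :: b) [] (by simp), getD_rep u (a :: b) [], drop_rep u (a :: b) []]
        simp [bLoop]
    | cons c r' =>
      have hcu : c = '_' := by
        have hf := dropWhile_head_false (p := fun c => !(c == '_'))
          (s.dropWhile (fun c => c == '_')) c r' (by rw [← hr, hrc])
        simpa using hf
      subst hcu
      have hdne : s.dropWhile (fun c => c == '_') ≠ [] := by
        intro hd
        rw [hr, hd] at hrc
        simp at hrc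
      have hLne : L ≠ [] := by rw [hL]; exact L_head_ne s hdne
      have hfne : List.replicate u '_' ++ L ≠ [] := by simp [hLne]
      simp only [hfne, ne_eq, not_false_eq_true, if_pos]
      rw [show splitU ('_' :: r') = [] :: splitU r' from by simp [splitU]]
      rw [show consH L ([] :: splitU r') = L :: splitU r' from by simp [consH]]
      simp only [pipeB]
      rw [findK_rep u L (splitU r') hLne, getD_rep u L (splitU r'), drop_rep u L (splitU r')]
      simp only [hfne, ne_eq, not_false_eq_true, if_pos]
      rw [loopA_acc (r'.length + 1) _ (by simp) false, mainR r'.length r' le_rfl]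
      rw [bLoop_tw (splitU r') [List.replicate u '_' ++ L] 0]
      simp

-- ===== VERDICT (by name: the statement is the Claim_ definition above) =====
theorem split_slug_spec : Claim_equal_split_slug := by
  intro slug _
  unfold Spec_split_slug split_slug split_slug_alt
  rw [splitOn_eq_splitU, mainT]
  rfl
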